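-- pv_equiv track=rewrite | github.com/RamonRomeroTec/ProgrammingPractice | codesignal/palindromeRearranging.py | palindromeRearranging
-- ===== SOURCE A (Python) =====
-- from collections import Counter
--
-- def palindromeRearranging(inputString):
--     size=len(inputString)
--     par=None
--     if size%2==0:
--         par=True
--     else:
--         par=False
--     a=Counter(inputString)
--     i=0
--     for k,v in a.items():
--         if v%2==1:
--             i=i+1
--
--     if par==True and i>0:
--         return False
--     elif par==False and i==1:
--         return True
--     elif par==True and i==0:
--         return True
--     else:
--         return False
-- ===== SOURCE B (Python) =====
-- def palindromeRearranging(inputString):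
--     odd = set()
--     for c in inputString:
--         if c in odd:
--             odd.discard(c)
--         else:
--             odd.add(c)
--     return len(odd) <= 1
-- ===== Notes on version B (the rewrite author's own statement) =====
-- stated objective: idiomatic
-- what changed: Replaces the Counter frequency table plus a second scan over its items and a four-way parity branch by a single streaming pass that toggles each character in an odd-parity set, returning len(odd) <= 1.
import Mathlib
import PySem

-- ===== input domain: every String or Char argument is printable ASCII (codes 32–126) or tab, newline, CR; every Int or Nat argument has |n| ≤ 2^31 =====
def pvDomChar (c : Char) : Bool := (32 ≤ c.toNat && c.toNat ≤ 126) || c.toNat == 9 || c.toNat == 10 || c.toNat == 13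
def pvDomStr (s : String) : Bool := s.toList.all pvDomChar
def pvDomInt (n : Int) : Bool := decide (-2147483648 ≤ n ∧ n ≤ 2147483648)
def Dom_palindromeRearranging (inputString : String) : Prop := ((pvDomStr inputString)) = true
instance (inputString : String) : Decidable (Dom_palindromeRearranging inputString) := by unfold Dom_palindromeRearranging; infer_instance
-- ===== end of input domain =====

-- B replaces A's Counter table + second scan over its items + four-way parity branch by one
-- streaming pass toggling an odd-parity set, then `len(odd) <= 1` (idiomatic; same cost).

-- ===== PORT A =====
def palindromeRearranging (inputString : String) : Bool :=
  let size : Int := PySem.Str.len inputString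
  let par : Bool := if PySem.Int.mod size 2 == 0 then true else false
  let a : PySem.Dict Char Int := PySem.Dict.counter inputString.toList
  let i : Int := a.items.foldl (fun i kv => if PySem.Int.mod kv.2 2 == 1 then i + 1 else i) 0
  if par == true && decide (i > 0) then false
  else if par == false && i == 1 then true
  else if par == true && i == 0 then true
  else false

-- ===== PORT B =====
def palindromeRearranging_alt (inputString : String) : Bool :=
  let odd : PySem.Set Char := inputString.toList.foldl
    (fun s c => if PySem.Set.contains s c then PySem.Set.discard s c else PySem.Set.add s c)
    PySem.Set.empty
  decide (PySem.Set.len odd ≤ 1)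

-- ===== PRECONDITION & SPEC =====
def Spec_palindromeRearranging (inputString : String) (out : Bool) : Prop := out = palindromeRearranging_alt inputString
instance (inputString : String) (out : Bool) : Decidable (Spec_palindromeRearranging inputString out) := by unfold Spec_palindromeRearranging; infer_instance

-- ===== CLAIM (what is proved, stated in full; the proofs are below) =====
def Claim_equal_palindromeRearranging : Prop := ∀ (inputString : String), Dom_palindromeRearranging inputString → Spec_palindromeRearranging inputString (palindromeRearranging inputString)

-- ===== LEMMAS AND PROOFS =====

-- the toggle step of B's loop
def togStep (s : PySem.Set Char) (c : Char) : PySem.Set Char :=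
  if PySem.Set.contains s c then PySem.Set.discard s c else PySem.Set.add s c

lemma togStep_nodup (s : PySem.Set Char) (c : Char) (h : s.Nodup) : (togStep s c).Nodup := by
  unfold togStep
  split
  · exact PySem.Set.nodup_discard s c h
  · rename_i hc
    unfold PySem.Set.add
    rw [Bool.not_eq_true] at hc
    rw [hc]
    simp only [Bool.false_eq_true, if_false]
    refine List.Nodup.append h (List.nodup_singleton c) ?_
    intro a ha hb
    simp at hb; subst hb
    exact absurd (by simpa using ha) (by simpa using hc)

lemma tog_nodup (l : List Char) (s : PySem.Set Char) (h : s.Nodup) :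
    (l.foldl togStep s).Nodup := by
  induction l generalizing s with
  | nil => exact h
  | cons x xs ih => exact ih _ (togStep_nodup _ _ h)

lemma mem_togStep_self (s : PySem.Set Char) (c : Char) : c ∈ togStep s c ↔ c ∉ s := by
  unfold togStep
  by_cases hc : PySem.Set.contains s c
  · rw [if_pos hc, PySem.Set.mem_discard]
    rw [PySem.Set.contains_iff] at hc
    simp [hc]
  · rw [if_neg hc]
    unfold PySem.Set.add
    rw [Bool.not_eq_true] at hc
    rw [hc]
    have hns : c ∉ s := fun h => absurd (by simpa using h : s.contains c = true) (by simpa using hc)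
    simp [hns]

lemma mem_togStep_ne (s : PySem.Set Char) (x c : Char) (hne : c ≠ x) :
    (c ∈ togStep s x ↔ c ∈ s) := by
  unfold togStep
  by_cases hc : PySem.Set.contains s x
  · rw [if_pos hc, PySem.Set.mem_discard]
    simp [hne]
  · rw [if_neg hc]
    unfold PySem.Set.add
    rw [Bool.not_eq_true] at hc
    rw [hc]
    simp [List.mem_append, hne]

lemma tog_mem (l : List Char) (s : PySem.Set Char) (c : Char) :
    (c ∈ l.foldl togStep s ↔ ((c ∈ s) ↔ l.count c % 2 = 0)) := by
  induction l generalizing s with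
  | nil => simp
  | cons x xs ih =>
    simp only [List.foldl_cons]
    rw [ih (togStep s x)]
    by_cases hx : c = x
    · subst hx
      rw [mem_togStep_self, List.count_cons_self]
      by_cases hcs : c ∈ s <;> simp [hcs] <;> omega
    · rw [mem_togStep_ne s x c hx, List.count_cons_of_ne (Ne.symm hx)]

lemma length_togStep (s : PySem.Set Char) (c : Char) (h : s.Nodup) :
    (togStep s c).length % 2 = (s.length + 1) % 2 := by
  unfold togStep
  by_cases hc : PySem.Set.contains s c
  · rw [if_pos hc]
    rw [PySem.Set.contains_iff] at hc
    unfold PySem.Set.discard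
    have hsplit := List.length_eq_countP_add_countP (fun y => y == c) (l := s)
    have hcount : List.countP (fun y => y == c) s = 1 := by
      have := List.count_eq_one_of_mem h hc
      simpa [List.count] using this
    have hfil : (List.filter (fun y => !y == c) s).length
        = List.countP (fun a => decide ¬(a == c) = true) s := by
      rw [← List.countP_eq_length_filter]
      apply List.countP_congr
      intro a _
      simp
    rw [hfil]
    omega
  · rw [if_neg hc]
    unfold PySem.Set.add
    rw [Bool.not_eq_true] at hc
    rw [hc]
    simp

lemma tog_parity (l : List Char) (s : PySem.Set Char) (h : s.Nodup) :
    (l.foldl togStep s).length % 2 = (s.length + l.length) % 2 := by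
  induction l generalizing s with
  | nil => simp
  | cons x xs ih =>
    simp only [List.foldl_cons, List.length_cons]
    rw [ih _ (togStep_nodup _ _ h)]
    have := length_togStep s x h
    omega

lemma foldl_count_int (ks : List Char) (p : Char → Bool) (acc : Int) :
    ks.foldl (fun i k => if p k then i + 1 else i) acc = acc + (ks.countP p : Int) := by
  induction ks generalizing acc with
  | nil => simp
  | cons x xs ih =>
    by_cases h : p x <;> simp [h, ih] <;> push_cast <;> ring

lemma mod_two_cast (n : Nat) : PySem.Int.mod (n : Int) 2 = ((n % 2 : Nat) : Int) := by
  unfold PySem.Int.mod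
  rw [Int.fmod_eq_emod]
  have : ((0:Int) ≤ 2 ∨ (2:Int) ∣ (n:Int)) := Or.inl (by norm_num)
  rw [if_pos this]
  omega

-- A's i equals the size of B's toggle set
lemma i_eq_tog (l : List Char) :
    ((PySem.Dict.counter l).items.foldl
        (fun i kv => if PySem.Int.mod kv.2 2 == 1 then i + 1 else i) (0 : Int))
      = ((l.foldl togStep PySem.Set.empty).length : Int) := by
  rw [PySem.Dict.items_counter, List.foldl_map, foldl_count_int]
  have hcp : List.countP (fun k => PySem.Int.mod ((l.count k : Nat) : Int) 2 == 1) (PySem.Set.ofList l)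
      = List.countP (fun k => decide (l.count k % 2 = 1)) (PySem.Set.ofList l) := by
    apply List.countP_congr
    intro k _
    rw [mod_two_cast]
    constructor
    · intro hh; simp at hh ⊢; omega
    · intro hh; simp at hh ⊢; omega
  rw [hcp]
  have hlen : List.countP (fun k => decide (l.count k % 2 = 1)) (PySem.Set.ofList l)
      = (l.foldl togStep PySem.Set.empty).length := by
    rw [List.countP_eq_length_filter]
    have h1 : (List.filter (fun k => decide (l.count k % 2 = 1)) (PySem.Set.ofList l)).Nodup :=
      (PySem.Set.nodup_ofList l).filter _
    have h2 : (l.foldl togStep PySem.Set.empty).Nodup := tog_nodup l _ List.nodup_nil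
    have hm : ∀ c, c ∈ List.filter (fun k => decide (l.count k % 2 = 1)) (PySem.Set.ofList l)
        ↔ c ∈ l.foldl togStep PySem.Set.empty := by
      intro c
      rw [List.mem_filter, PySem.Set.mem_ofList, tog_mem]
      constructor
      · rintro ⟨_, hodd⟩
        simp at hodd
        simp [PySem.Set.empty]
        omega
      · intro hh
        simp [PySem.Set.empty] at hh
        have hodd : l.count c % 2 = 1 := by omega
        have hmem : c ∈ l := by
          by_contra hcm
          rw [List.count_eq_zero_of_not_mem hcm] at hodd
          omega
        simp [hmem, hodd]
    rw [← List.toFinset_card_of_nodup h1, ← List.toFinset_card_of_nodup h2]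
    congr 1
    ext c
    simp only [List.mem_toFinset]
    exact hm c
  rw [hlen]
  omega

lemma alt_eq (s : String) : palindromeRearranging_alt s
    = decide ((((s.toList.foldl togStep PySem.Set.empty).length : Nat) : Int) ≤ 1) := rfl

-- ===== VERDICT (by name: the statement is the Claim_ definition above) =====
theorem palindromeRearranging_spec : Claim_equal_palindromeRearranging := by
  intro inputString _
  unfold Spec_palindromeRearranging
  rw [alt_eq]
  unfold palindromeRearranging
  show (if _ then _ else _) = _
  rw [i_eq_tog]
  set l := inputString.toList with hl
  set n := (l.foldl togStep PySem.Set.empty).length with hn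
  have hsz : PySem.Str.len inputString = (l.length : Int) := by
    simp [PySem.Str.len, hl]
  rw [hsz, mod_two_cast]
  have hpar : n % 2 = l.length % 2 := by
    have := tog_parity l PySem.Set.empty List.nodup_nil
    simpa [PySem.Set.empty] using this
  by_cases hL : l.length % 2 = 0
  · have hne : n % 2 = 0 := by omega
    by_cases h0 : n = 0
    · simp [hL, h0]
    · have hgt : (0 : Int) < (n : Int) := by exact_mod_cast Nat.pos_of_ne_zero h0
      have h2 : ¬ (((n : Nat) : Int) ≤ 1) := by
        have h2' : 2 ≤ n := by omega
        exact_mod_cast by omega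
      simp only [hL, decide_true, beq_self_eq_true, if_true, Bool.true_and, hgt, h2,
        decide_eq_true_eq, decide_eq_false_iff_not, not_false_eq_true]
      simp [hgt, h2]
  · have h1 : l.length % 2 = 1 := by omega
    have hno : n % 2 = 1 := by omega
    by_cases hone : n = 1
    · simp [h1, hone]
    · have h3 : 3 ≤ n := by omega
      have hA : ¬ (((n : Nat) : Int) = 1) := by exact_mod_cast by omega
      have hB : ¬ (((n : Nat) : Int) ≤ 1) := by exact_mod_cast by omega
      simp [h1, hA, hB]
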